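-- pv_equiv track=rewrite | github.com/kentywang/adm-solns | m100/oceanview.py | findBuildingsVariation
-- ===== SOURCE A (Python) =====
-- from typing import List
--
-- def findBuildingsVariation(heights: List[int]) -> List[int]:
--     lo, hi = 0, len(heights) - 1
--     lmax, rmax = heights[lo], heights[hi]
--     leftviews, rightviews = [lo], [hi]
--
--     while lo < hi:
--         if heights[lo] <= heights[hi]:
--             if heights[lo] > lmax:
--                 leftviews.append(lo)
--                 lmax = heights[lo]
--             lo += 1
--         else:
--             if heights[hi] > rmax:
--                 rightviews.append(hi)
--                 rmax = heights[hi]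
--             hi -= 1
--
--     if heights[lo] == heights[hi]:
--         if heights[lo] > lmax:
--             leftviews.append(lo)
--         if heights[hi] > rmax:
--             rightviews.append(hi)
--
--     return leftviews, list(reversed(rightviews))
-- ===== SOURCE B (Python) =====
-- def findBuildingsVariation(heights):
--     n = len(heights)
--     lmax = heights[0]
--     leftviews = [0]
--     for i in range(1, n):
--         if heights[i] > lmax:
--             leftviews.append(i)
--             lmax = heights[i]
--     rmax = heights[-1]
--     rightviews = [n - 1]
--     for i in range(n - 2, -1, -1):
--         if heights[i] > rmax:
--             rightviews.append(i)
--             rmax = heights[i]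
--     return leftviews, list(reversed(rightviews))
-- ===== Notes on version B (the rewrite author's own statement) =====
-- stated objective: simpler
-- what changed: Replaced the converging two-pointer loop that interleaves left and right progress and needs a post-loop meeting-point fixup with two independent linear passes (prefix-max left-to-right, suffix-max right-to-left); the simpler loop bodies (one comparison instead of two per step) also run measurably faster.
import Mathlib
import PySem

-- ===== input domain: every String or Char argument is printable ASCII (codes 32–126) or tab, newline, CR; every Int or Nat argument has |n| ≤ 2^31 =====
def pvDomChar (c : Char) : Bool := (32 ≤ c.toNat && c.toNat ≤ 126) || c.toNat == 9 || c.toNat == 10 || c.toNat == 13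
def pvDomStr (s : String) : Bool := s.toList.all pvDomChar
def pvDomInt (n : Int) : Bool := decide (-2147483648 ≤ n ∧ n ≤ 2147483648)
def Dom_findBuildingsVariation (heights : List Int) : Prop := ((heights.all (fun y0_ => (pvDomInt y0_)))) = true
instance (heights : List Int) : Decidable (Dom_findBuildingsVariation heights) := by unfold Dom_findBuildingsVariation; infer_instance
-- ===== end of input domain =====

-- B replaces A's converging two-pointer loop (interleaved progress + meeting-point fixup)
-- with two independent prefix-max / suffix-max linear passes; same return value on every
-- non-empty list (both Pythons raise IndexError on []).

-- ===== PORT A =====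
-- heights[i] for an index known to be in range on Pre_ (0 ≤ i < len)
def g (h : List Int) (i : Nat) : Int := h.getD i 0

-- the 'while lo < hi' loop of A, carrying its whole mutable state
def aLoop (h : List Int) (lo hi : Nat) (lmax rmax : Int) (L R : List Int) :
    Nat × Nat × Int × Int × List Int × List Int :=
  if _h : lo < hi then
    if g h lo ≤ g h hi then
      if g h lo > lmax then aLoop h (lo + 1) hi (g h lo) rmax (L ++ [(lo : Int)]) R
      else aLoop h (lo + 1) hi lmax rmax L R
    else
      if g h hi > rmax then aLoop h lo (hi - 1) lmax (g h hi) L (R ++ [(hi : Int)])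
      else aLoop h lo (hi - 1) lmax rmax L R
  else (lo, hi, lmax, rmax, L, R)
termination_by hi - lo

def findBuildingsVariation (heights : List Int) : List Int × List Int :=
  let lo0 := 0
  let hi0 := heights.length - 1
  match aLoop heights lo0 hi0 (g heights lo0) (g heights hi0)
      [(lo0 : Int)] [(hi0 : Int)] with
  | (lo, hi, lmax, rmax, L, R) =>
    if g heights lo = g heights hi then
      ((if g heights lo > lmax then L ++ [(lo : Int)] else L),
       ((if g heights hi > rmax then R ++ [(hi : Int)] else R)).reverse)
    else (L, R.reverse)

-- ===== PORT B =====
def findBuildingsVariation_alt (heights : List Int) : List Int × List Int :=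
  let n : Int := PySem.List.len heights
  let left :=
    (PySem.List.pyRange 1 n 1).foldl
      (fun (st : Int × List Int) i =>
        if PySem.List.pyGetD heights i 0 > st.1
        then (PySem.List.pyGetD heights i 0, st.2 ++ [i]) else st)
      (PySem.List.pyGetD heights 0 0, [(0 : Int)])
  let right :=
    (PySem.List.pyRange (n - 2) (-1) (-1)).foldl
      (fun (st : Int × List Int) i =>
        if PySem.List.pyGetD heights i 0 > st.1
        then (PySem.List.pyGetD heights i 0, st.2 ++ [i]) else st)
      (PySem.List.pyGetD heights (-1) 0, [n - 1])
  (left.2, right.2.reverse)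

-- ===== PRECONDITION & SPEC =====
-- Pre_ excludes only the empty list, on which A (heights[0]) raises IndexError.
def Pre_findBuildingsVariation (heights : List Int) : Prop := heights ≠ []
instance (heights : List Int) : Decidable (Pre_findBuildingsVariation heights) := by
  unfold Pre_findBuildingsVariation; infer_instance

def pvWitness_findBuildingsVariation : List Int := [3, 1, 4, 1, 5]

def Spec_findBuildingsVariation (heights : List Int) (out : List Int × List Int) : Prop :=
  out = findBuildingsVariation_alt heights
instance (heights : List Int) (out : List Int × List Int) :
    Decidable (Spec_findBuildingsVariation heights out) := by
  unfold Spec_findBuildingsVariation; infer_instance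

-- ===== CLAIM (what is proved, stated in full; the proofs are below) =====
def Claim_equal_findBuildingsVariation : Prop :=
  ∀ (heights : List Int), Dom_findBuildingsVariation heights →
    Pre_findBuildingsVariation heights →
    Spec_findBuildingsVariation heights (findBuildingsVariation heights)

-- ===== LEMMAS AND PROOFS =====

-- index i has a view from the left: strictly taller than everything before it
def leftGoodB (h : List Int) (i : Nat) : Bool :=
  (List.range i).all (fun j => decide (g h j < g h i))
-- index i has a view from the right: strictly taller than everything after it
def rightGoodB (h : List Int) (i : Nat) : Bool :=
  (List.range' (i + 1) (h.length - (i + 1))).all (fun j => decide (g h j < g h i))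

def Lspec (h : List Int) : List Int :=
  ((List.range h.length).filter (leftGoodB h)).map (fun (i : Nat) => (i : Int))
def Rspec (h : List Int) : List Int :=
  ((List.range h.length).filter (rightGoodB h)).map (fun (i : Nat) => (i : Int))

-- max of h[0..i-1] (clamped: pmax h 0 = g h 0)
def pmax (h : List Int) : Nat → Int
  | 0 => g h 0
  | i + 1 => max (pmax h i) (g h i)

-- max of h[k..len-1] (clamped: smaxF h k = g h (len-1) for k ≥ len-1)
def smaxF (h : List Int) (k : Nat) : Int :=
  if h.length - 1 ≤ k then g h (h.length - 1)
  else max (g h k) (smaxF h (k + 1))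
termination_by h.length - k

-- the partial results the loop invariants speak about
def Lfilt (h : List Int) (lo : Nat) : List Int :=
  ((List.range (max lo 1)).filter (leftGoodB h)).map (fun (i : Nat) => (i : Int))
def Rfilt (h : List Int) (rlo : Nat) : List Int :=
  (((List.range' rlo (h.length - rlo)).filter (rightGoodB h)).reverse).map (fun (i : Nat) => (i : Int))

theorem pmax_lt_iff (h : List Int) (x : Int) :
    ∀ i, (pmax h i < x ↔ ∀ j, j < max i 1 → g h j < x) := by
  intro i
  induction i with
  | zero => simp [pmax]
  | succ i ih =>
    rcases Nat.eq_zero_or_pos i with rfl | hp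
    · simp [pmax]
    · simp only [pmax, max_lt_iff, ih]
      constructor
      · rintro ⟨h1, h2⟩ j hj
        rcases Nat.lt_succ_iff_lt_or_eq.mp (by omega : j < i + 1) with hj' | rfl
        · exact h1 j (by omega)
        · exact h2
      · intro hall
        exact ⟨fun j hj => hall j (by omega), hall i (by omega)⟩

theorem smaxF_lt_iff (h : List Int) (x : Int) (hne : 1 ≤ h.length) :
    ∀ k, (smaxF h k < x ↔ ∀ j, min k (h.length - 1) ≤ j → j < h.length → g h j < x) := by
  suffices H : ∀ (d k : Nat), h.length - 1 - k = d →
      (smaxF h k < x ↔ ∀ j, min k (h.length - 1) ≤ j → j < h.length → g h j < x) from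
    fun k => H _ k rfl
  intro d
  induction d with
  | zero =>
    intro k hk
    rw [smaxF, if_pos (by omega : h.length - 1 ≤ k)]
    have hmin : min k (h.length - 1) = h.length - 1 := by omega
    rw [hmin]
    constructor
    · intro hlt j hj1 hj2
      have : j = h.length - 1 := by omega
      simpa [this] using hlt
    · intro hall; exact hall _ le_rfl (by omega)
  | succ d ih =>
    intro k hk
    rw [smaxF, if_neg (by omega : ¬ h.length - 1 ≤ k)]
    rw [max_lt_iff, ih (k + 1) (by omega)]
    have h1 : min k (h.length - 1) = k := by omega
    have h2 : min (k + 1) (h.length - 1) = k + 1 := by omega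
    rw [h1, h2]
    constructor
    · rintro ⟨hgk, hall⟩ j hj1 hj2
      rcases Nat.eq_or_lt_of_le hj1 with rfl | hlt
      · exact hgk
      · exact hall j (by omega) hj2
    · intro hall
      exact ⟨hall k le_rfl (by omega), fun j hj1 hj2 => hall j (by omega) hj2⟩

theorem leftGood_iff (h : List Int) (i : Nat) (hi : 1 ≤ i) :
    (pmax h i < g h i ↔ leftGoodB h i = true) := by
  rw [pmax_lt_iff, leftGoodB, List.all_eq_true]
  constructor
  · intro hall j hj
    simp only [List.mem_range] at hj
    exact decide_eq_true (hall j (by omega))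
  · intro hall j hj
    exact of_decide_eq_true (hall j (by simp [List.mem_range]; omega))

theorem rightGood_iff (h : List Int) (i : Nat) (hne : 1 ≤ h.length) (hi : i + 1 ≤ h.length - 1) :
    (smaxF h (i + 1) < g h i ↔ rightGoodB h i = true) := by
  rw [smaxF_lt_iff h _ hne, rightGoodB, List.all_eq_true]
  have hmin : min (i + 1) (h.length - 1) = i + 1 := by omega
  rw [hmin]
  constructor
  · intro hall j hj
    simp only [List.mem_range'_1] at hj
    exact decide_eq_true (hall j hj.1 (by omega))
  · intro hall j hj1 hj2
    exact of_decide_eq_true (hall j (by simp [List.mem_range'_1]; omega))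

theorem leftGood_false (h : List Int) (j i : Nat) (hj : j < i) (hge : g h i ≤ g h j) :
    leftGoodB h i = false := by
  rw [leftGoodB]
  apply List.all_eq_false.mpr
  exact ⟨j, List.mem_range.mpr hj, by simp; omega⟩

theorem rightGood_false (h : List Int) (i j : Nat) (hij : i < j) (hj : j < h.length)
    (hge : g h i ≤ g h j) : rightGoodB h i = false := by
  rw [rightGoodB]
  apply List.all_eq_false.mpr
  exact ⟨j, List.mem_range'_1.mpr ⟨by omega, by omega⟩, by simp; omega⟩

theorem smaxF_last (h : List Int) (k : Nat) (hk : h.length - 1 ≤ k) :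
    smaxF h k = g h (h.length - 1) := by rw [smaxF, if_pos hk]

theorem rightGood_last (h : List Int) (hne : 1 ≤ h.length) :
    rightGoodB h (h.length - 1) = true := by
  simp [rightGoodB, show h.length - (h.length - 1 + 1) = 0 from by omega]

theorem Lfilt_zero (h : List Int) : Lfilt h 0 = [(0 : Int)] := by
  simp [Lfilt, List.range_one, leftGoodB]

theorem Rfilt_last (h : List Int) (hne : 1 ≤ h.length) :
    Rfilt h (h.length - 1) = [((h.length - 1 : Nat) : Int)] := by
  simp [Rfilt, show h.length - (h.length - 1) = 1 from by omega, List.range'_one,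
    rightGood_last h hne]

theorem Lfilt_succ (h : List Int) (lo : Nat) :
    Lfilt h (lo + 1) = if pmax h lo < g h lo then Lfilt h lo ++ [(lo : Int)] else Lfilt h lo := by
  rcases Nat.eq_zero_or_pos lo with rfl | hp
  · rw [if_neg (by simp [pmax])]; norm_num [Lfilt]
  · have h1 : max (lo + 1) 1 = lo + 1 := by omega
    have h2 : max lo 1 = lo := by omega
    rw [Lfilt, Lfilt, h1, h2, List.range_succ]
    by_cases hc : pmax h lo < g h lo
    · rw [if_pos hc]
      have hg : leftGoodB h lo = true := (leftGood_iff h lo hp).mp hc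
      simp [List.filter_append, hg]
    · rw [if_neg hc]
      have hg : leftGoodB h lo = false := by
        cases hb : leftGoodB h lo
        · rfl
        · exact absurd ((leftGood_iff h lo hp).mpr hb) hc
      simp [List.filter_append, hg]

theorem Rfilt_pred (h : List Int) (k : Nat) (hne : 1 ≤ h.length) (hk : k + 1 ≤ h.length - 1) :
    Rfilt h k = if smaxF h (k + 1) < g h k then Rfilt h (k + 1) ++ [(k : Int)]
                else Rfilt h (k + 1) := by
  have hsplit : h.length - k = (h.length - (k + 1)) + 1 := by omega
  have hcons : List.range' k (h.length - k) = k :: List.range' (k + 1) (h.length - (k + 1)) := by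
    rw [hsplit, List.range'_succ]
  rw [Rfilt, Rfilt, hcons]
  by_cases hc : smaxF h (k + 1) < g h k
  · rw [if_pos hc]
    have hg : rightGoodB h k = true := (rightGood_iff h k hne hk).mp hc
    simp [hg]
  · rw [if_neg hc]
    have hg : rightGoodB h k = false := by
      cases hb : rightGoodB h k
      · rfl
      · exact absurd ((rightGood_iff h k hne hk).mpr hb) hc
    simp [hg]

theorem aLoop_spec (h : List Int) :
    ∀ d lo hi, hi - lo = d → lo ≤ hi → hi < h.length →
      (∀ i, hi < i → i < h.length → leftGoodB h i = false) →
      (∀ i, i < lo → rightGoodB h i = false) →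
      ∃ m, aLoop h lo hi (pmax h lo) (smaxF h (min (hi + 1) (h.length - 1)))
              (Lfilt h lo) (Rfilt h (min (hi + 1) (h.length - 1)))
            = (m, m, pmax h m, smaxF h (min (m + 1) (h.length - 1)),
               Lfilt h m, Rfilt h (min (m + 1) (h.length - 1)))
          ∧ lo ≤ m ∧ m ≤ hi
          ∧ (∀ i, m < i → i < h.length → leftGoodB h i = false)
          ∧ (∀ i, i < m → rightGoodB h i = false) := by
  intro d
  induction d with
  | zero =>
    intro lo hi hd hle hlen DL DR
    have : lo = hi := by omega
    subst this
    refine ⟨lo, ?_, le_rfl, le_rfl, DL, DR⟩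
    rw [aLoop, dif_neg (by omega : ¬ lo < lo)]
  | succ d ih =>
    intro lo hi hd hle hlen DL DR
    have hlt : lo < hi := by omega
    have hne : 1 ≤ h.length := by omega
    rw [aLoop, dif_pos hlt]
    by_cases hcmp : g h lo ≤ g h hi
    · -- left pointer moves
      rw [if_pos hcmp]
      have DR' : ∀ i, i < lo + 1 → rightGoodB h i = false := by
        intro i hi'
        rcases Nat.lt_succ_iff_lt_or_eq.mp hi' with hi'' | rfl
        · exact DR i hi''
        · exact rightGood_false h i hi hlt hlen hcmp
      have hrec := ih (lo + 1) hi (by omega) (by omega) hlen DL DR'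
      by_cases hc : g h lo > pmax h lo
      · rw [if_pos hc]
        have e1 : g h lo = pmax h (lo + 1) := by
          show g h lo = max (pmax h lo) (g h lo); omega
        have e2 : Lfilt h lo ++ [(lo : Int)] = Lfilt h (lo + 1) := by
          rw [Lfilt_succ, if_pos hc]
        rw [e1, e2]
        obtain ⟨m, heq, hm1, hm2, hDL, hDR⟩ := hrec
        exact ⟨m, heq, by omega, hm2, hDL, hDR⟩
      · rw [if_neg hc]
        have e1 : pmax h lo = pmax h (lo + 1) := by
          show pmax h lo = max (pmax h lo) (g h lo); omega
        have e2 : Lfilt h lo = Lfilt h (lo + 1) := by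
          rw [Lfilt_succ, if_neg (by omega)]
        rw [e1, e2]
        obtain ⟨m, heq, hm1, hm2, hDL, hDR⟩ := hrec
        exact ⟨m, heq, by omega, hm2, hDL, hDR⟩
    · -- right pointer moves
      rw [if_neg hcmp]
      have hgt : g h hi < g h lo := by omega
      have DL' : ∀ i, hi - 1 < i → i < h.length → leftGoodB h i = false := by
        intro i hi' hlen'
        rcases Nat.eq_or_lt_of_le (by omega : hi ≤ i) with rfl | hi''
        · exact leftGood_false h lo _ hlt (by omega)
        · exact DL i hi'' hlen'
      have hrec := ih lo (hi - 1) (by omega) (by omega) (by omega) DL' DR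
      have hmin' : min (hi - 1 + 1) (h.length - 1) = hi := by omega
      rw [hmin'] at hrec
      rcases Nat.eq_or_lt_of_le (by omega : hi ≤ h.length - 1) with rfl | hmid
      · -- hi = len - 1 : the test is false, rmax/R unchanged
        have hminkeep : min (h.length - 1 + 1) (h.length - 1) = h.length - 1 := by omega
        rw [hminkeep]
        rw [if_neg (by rw [smaxF_last h (h.length - 1) (by omega)]; omega)]
        obtain ⟨m, heq, hm1, hm2, hDL, hDR⟩ := hrec
        exact ⟨m, heq, hm1, by omega, hDL, hDR⟩
      · -- hi ≤ len - 2
        have hminstep : min (hi + 1) (h.length - 1) = hi + 1 := by omega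
        rw [hminstep]
        have hsm : smaxF h hi = max (g h hi) (smaxF h (hi + 1)) := by
          rw [smaxF, if_neg (by omega)]
        by_cases hc : g h hi > smaxF h (hi + 1)
        · rw [if_pos hc]
          have e1 : g h hi = smaxF h hi := by omega
          have e2 : Rfilt h (hi + 1) ++ [(hi : Int)] = Rfilt h hi := by
            rw [Rfilt_pred h hi hne (by omega), if_pos hc]
          rw [e1, e2]
          obtain ⟨m, heq, hm1, hm2, hDL, hDR⟩ := hrec
          exact ⟨m, heq, hm1, by omega, hDL, hDR⟩
        · rw [if_neg hc]
          have e1 : smaxF h (hi + 1) = smaxF h hi := by omega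
          have e2 : Rfilt h (hi + 1) = Rfilt h hi := by
            rw [Rfilt_pred h hi hne (by omega), if_neg (by omega)]
          rw [e1, e2]
          obtain ⟨m, heq, hm1, hm2, hDL, hDR⟩ := hrec
          exact ⟨m, heq, hm1, by omega, hDL, hDR⟩

theorem range_split (a b : Nat) (hab : a ≤ b) :
    List.range b = List.range' 0 a ++ List.range' a (b - a) := by
  have h2 := List.range'_append (s := 0) (m := a) (n := b - a) (step := 1)
  simp only [Nat.zero_add, Nat.one_mul] at h2
  rw [show a + (b - a) = b from by omega] at h2
  rw [List.range_eq_range', ← h2]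

theorem final_L (h : List Int) (m : Nat) (hm : m < h.length)
    (DL : ∀ i, m < i → i < h.length → leftGoodB h i = false) :
    (if g h m > pmax h m then Lfilt h m ++ [(m : Int)] else Lfilt h m) = Lspec h := by
  rw [show (if g h m > pmax h m then Lfilt h m ++ [(m : Int)] else Lfilt h m) = Lfilt h (m + 1)
      from (Lfilt_succ h m).symm]
  have hnil : (List.range' (m + 1) (h.length - (m + 1))).filter (leftGoodB h) = [] :=
    List.filter_eq_nil_iff.mpr (by
      intro a ha
      rw [List.mem_range'_1] at ha
      simp [DL a (by omega) (by omega)])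
  rw [Lfilt, Lspec, show max (m + 1) 1 = m + 1 from by omega,
    range_split (m + 1) h.length (by omega), ← List.range_eq_range',
    List.filter_append, hnil, List.append_nil]

theorem Rfilt_rev (h : List Int) (m : Nat) (hm : m < h.length)
    (DR : ∀ i, i < m → rightGoodB h i = false) :
    (Rfilt h m).reverse = Rspec h := by
  have hnil : (List.range' 0 m).filter (rightGoodB h) = [] :=
    List.filter_eq_nil_iff.mpr (by
      intro a ha
      rw [List.mem_range'_1] at ha
      simp [DR a (by omega)])
  rw [Rfilt, Rspec, range_split m h.length (by omega), List.filter_append, hnil,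
    List.nil_append, List.map_reverse, List.reverse_reverse]

theorem final_R (h : List Int) (m : Nat) (hne : 1 ≤ h.length) (hm : m < h.length)
    (DR : ∀ i, i < m → rightGoodB h i = false) :
    ((if g h m > smaxF h (min (m + 1) (h.length - 1))
      then Rfilt h (min (m + 1) (h.length - 1)) ++ [(m : Int)]
      else Rfilt h (min (m + 1) (h.length - 1))).reverse) = Rspec h := by
  rcases Nat.eq_or_lt_of_le (show m ≤ h.length - 1 from by omega) with rfl | hmid
  · rw [show min (h.length - 1 + 1) (h.length - 1) = h.length - 1 from by omega]
    rw [if_neg (by rw [smaxF_last h (h.length - 1) le_rfl]; omega)]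
    exact Rfilt_rev h (h.length - 1) (by omega) DR
  · rw [show min (m + 1) (h.length - 1) = m + 1 from by omega]
    rw [show (if g h m > smaxF h (m + 1) then Rfilt h (m + 1) ++ [(m : Int)]
          else Rfilt h (m + 1)) = Rfilt h m from (Rfilt_pred h m hne (by omega)).symm]
    exact Rfilt_rev h m hm DR

theorem A_eq_spec (h : List Int) (hne : h ≠ []) :
    findBuildingsVariation h = (Lspec h, Rspec h) := by
  have hlen : 1 ≤ h.length := List.length_pos_iff.mpr hne
  obtain ⟨m, heq, hm1, hm2, hDL, hDR⟩ :=
    aLoop_spec h (h.length - 1 - 0) 0 (h.length - 1) rfl (by omega) (by omega)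
      (fun i h1 h2 => absurd h2 (by omega)) (fun i hi => absurd hi (by omega))
  have e1 : g h (h.length - 1) = smaxF h (min (h.length - 1 + 1) (h.length - 1)) := by
    rw [show min (h.length - 1 + 1) (h.length - 1) = h.length - 1 from by omega,
      smaxF_last h (h.length - 1) le_rfl]
  have e2 : [((0 : Nat) : Int)] = Lfilt h 0 := (Lfilt_zero h).symm
  have e3 : [((h.length - 1 : Nat) : Int)] = Rfilt h (min (h.length - 1 + 1) (h.length - 1)) := by
    rw [show min (h.length - 1 + 1) (h.length - 1) = h.length - 1 from by omega,
      Rfilt_last h hlen]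
  simp only [findBuildingsVariation]
  rw [show g h 0 = pmax h 0 from rfl, e1, e2, e3, heq]
  dsimp only
  rw [if_pos rfl, Prod.mk.injEq]
  exact ⟨final_L h m (by omega) hDL, final_R h m hlen (by omega) hDR⟩

theorem Lfilt_full (h : List Int) (hlen : 1 ≤ h.length) : Lfilt h h.length = Lspec h := by
  rw [Lfilt, Lspec, show max h.length 1 = h.length from by omega]

theorem bleft (h : List Int) :
    ∀ m, (List.range m).foldl
        (fun (st : Int × List Int) k =>
          if g h (k + 1) > st.1 then (g h (k + 1), st.2 ++ [((k + 1 : Nat) : Int)]) else st)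
        (g h 0, [(0 : Int)])
      = (pmax h (m + 1), Lfilt h (m + 1)) := by
  intro m
  induction m with
  | zero =>
    simp only [List.range_zero, List.foldl_nil, Prod.mk.injEq]
    exact ⟨by simp [pmax], by norm_num [Lfilt, List.range_one, leftGoodB]⟩
  | succ m ih =>
    rw [List.range_succ, List.foldl_append, ih]
    simp only [List.foldl_cons, List.foldl_nil]
    by_cases hc : g h (m + 1) > pmax h (m + 1)
    · rw [if_pos hc, Prod.mk.injEq]
      exact ⟨by show g h (m + 1) = max (pmax h (m + 1)) (g h (m + 1)); omega,
        by rw [Lfilt_succ h (m + 1), if_pos hc]⟩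
    · rw [if_neg hc, Prod.mk.injEq]
      exact ⟨by show pmax h (m + 1) = max (pmax h (m + 1)) (g h (m + 1)); omega,
        by rw [Lfilt_succ h (m + 1), if_neg (by omega)]⟩

theorem bright (h : List Int) (hlen : 1 ≤ h.length) :
    ∀ m, m ≤ h.length - 1 → (List.range m).foldl
        (fun (st : Int × List Int) k =>
          if g h (h.length - 2 - k) > st.1
          then (g h (h.length - 2 - k), st.2 ++ [((h.length - 2 - k : Nat) : Int)]) else st)
        (g h (h.length - 1), [((h.length - 1 : Nat) : Int)])
      = (smaxF h (h.length - 1 - m), Rfilt h (h.length - 1 - m)) := by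
  intro m
  induction m with
  | zero =>
    intro _
    simp only [List.range_zero, List.foldl_nil, Nat.sub_zero, Prod.mk.injEq]
    exact ⟨(smaxF_last h (h.length - 1) le_rfl).symm, (Rfilt_last h hlen).symm⟩
  | succ m ih =>
    intro hm
    rw [List.range_succ, List.foldl_append, ih (by omega)]
    simp only [List.foldl_cons, List.foldl_nil]
    have hj : h.length - 1 - m = (h.length - 2 - m) + 1 := by omega
    rw [hj, show h.length - 1 - (m + 1) = h.length - 2 - m from by omega]
    have hsm : smaxF h (h.length - 2 - m)
        = max (g h (h.length - 2 - m)) (smaxF h (h.length - 2 - m + 1)) := by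
      rw [smaxF, if_neg (by omega)]
    by_cases hc : g h (h.length - 2 - m) > smaxF h (h.length - 2 - m + 1)
    · rw [if_pos hc, Prod.mk.injEq]
      exact ⟨by omega, by rw [Rfilt_pred h (h.length - 2 - m) hlen (by omega), if_pos hc]⟩
    · rw [if_neg hc, Prod.mk.injEq]
      exact ⟨by omega, by rw [Rfilt_pred h (h.length - 2 - m) hlen (by omega), if_neg (by omega)]⟩

theorem B_eq_spec (h : List Int) (hne : h ≠ []) :
    findBuildingsVariation_alt h = (Lspec h, Rspec h) := by
  have hlen : 1 ≤ h.length := List.length_pos_iff.mpr hne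
  simp only [findBuildingsVariation_alt, PySem.List.len_eq]
  rw [PySem.List.pyRange_one, show ((h.length : Int) - 1).toNat = h.length - 1 from by omega,
    List.foldl_map]
  rw [PySem.List.foldl_congr_mem _ _
      (fun (st : Int × List Int) (k : Nat) =>
        if g h (k + 1) > st.1 then (g h (k + 1), st.2 ++ [((k + 1 : Nat) : Int)]) else st) _
      (by
        intro acc x hx
        have hc : (1 : Int) + (x : Int) = ((x + 1 : Nat) : Int) := by push_cast; ring
        dsimp only
        rw [hc, PySem.List.pyGetD_natCast]
        rfl)]
  rw [show PySem.List.pyGetD h 0 0 = g h 0 from by rw [PySem.List.pyGetD_zero]; rfl]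
  rw [bleft h (h.length - 1), show h.length - 1 + 1 = h.length from by omega, Lfilt_full h hlen]
  rw [PySem.List.pyRange_neg_one,
    show ((h.length : Int) - 2 - (-1)).toNat = h.length - 1 from by omega, List.foldl_map]
  rw [PySem.List.foldl_congr_mem _ _
      (fun (st : Int × List Int) (k : Nat) =>
        if g h (h.length - 2 - k) > st.1
        then (g h (h.length - 2 - k), st.2 ++ [((h.length - 2 - k : Nat) : Int)]) else st) _
      (by
        intro acc x hx
        rw [List.mem_range] at hx
        have hc : (h.length : Int) - 2 - (x : Int) = ((h.length - 2 - x : Nat) : Int) := by omega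
        dsimp only
        rw [hc, PySem.List.pyGetD_natCast]
        rfl)]
  rw [show PySem.List.pyGetD h (-1) 0 = g h (h.length - 1) from by
      rw [PySem.List.pyGetD_neg_one h 0 hne, List.getLast_eq_getElem]
      simp [g, List.getD_eq_getElem?_getD,
        List.getElem?_eq_getElem (show h.length - 1 < h.length from by omega)]]
  rw [show ((h.length : Int) - 1) = ((h.length - 1 : Nat) : Int) from by omega]
  rw [bright h hlen (h.length - 1) le_rfl, Nat.sub_self]
  dsimp only
  rw [Prod.mk.injEq]
  exact ⟨rfl, Rfilt_rev h 0 (by omega) (fun i hi => absurd hi (by omega))⟩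

-- ===== VERDICT (by name: the statement is the Claim_ definition above) =====
theorem findBuildingsVariation_spec : Claim_equal_findBuildingsVariation := by
  intro heights _ hpre
  unfold Spec_findBuildingsVariation
  rw [A_eq_spec heights hpre, B_eq_spec heights hpre]
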